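-- pv_equiv track=rewrite | github.com/wo3kie/StructCompacter | bin/sc.py | get_from_position_and_type_size
-- ===== SOURCE A (Python) =====
-- def precondition( condition ):
--     assert condition, str( condition )
--
-- def get_from_position_and_type_size( this_offset, type_size ):
--     precondition( this_offset >= 0 )
--     precondition( type_size > 0 )
--
--     for i in [ 8, 4, 2, 1 ]:
--         if i > type_size:
--             continue
--
--         if this_offset % i != 0:
--             continue
--
--         if type_size % i != 0:
--             continue
--
--         return i
--
--     return 1
-- ===== SOURCE B (Python) =====
-- import math
--
-- def precondition( condition ):
--     assert condition, str( condition )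
--
-- def get_from_position_and_type_size( this_offset, type_size ):
--     precondition( this_offset >= 0 )
--     precondition( type_size > 0 )
--
--     return math.gcd( this_offset, type_size, 8 )
-- ===== Notes on version B (the rewrite author's own statement) =====
-- stated objective: simpler
-- what changed: Replaces the scan over candidates [8,4,2,1] with three divisibility tests each by the closed form math.gcd(this_offset, type_size, 8), which is the largest divisor of 8 dividing both arguments; the two precondition asserts are kept.
import Mathlib
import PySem

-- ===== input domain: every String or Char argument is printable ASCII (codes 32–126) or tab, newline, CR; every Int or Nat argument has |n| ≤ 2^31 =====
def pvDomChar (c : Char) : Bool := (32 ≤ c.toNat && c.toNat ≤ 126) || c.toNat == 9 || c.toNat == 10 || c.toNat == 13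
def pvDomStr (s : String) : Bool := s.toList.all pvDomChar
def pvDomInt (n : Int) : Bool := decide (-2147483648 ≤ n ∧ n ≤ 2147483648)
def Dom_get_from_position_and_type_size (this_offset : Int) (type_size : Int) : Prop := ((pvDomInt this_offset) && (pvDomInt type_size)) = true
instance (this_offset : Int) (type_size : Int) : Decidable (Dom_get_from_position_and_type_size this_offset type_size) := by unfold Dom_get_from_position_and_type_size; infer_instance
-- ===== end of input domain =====

-- B replaces A's scan over [8,4,2,1] by the closed form gcd(this_offset, type_size, 8) (simpler).

-- ===== PORT A =====
-- the for-loop with continue/early-return, as structural recursion over the literal list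
def pvLoopA (this_offset : Int) (type_size : Int) : List Int → Int
  | [] => 1
  | i :: rest =>
      if i > type_size then pvLoopA this_offset type_size rest
      else if PySem.Int.mod this_offset i ≠ 0 then pvLoopA this_offset type_size rest
      else if PySem.Int.mod type_size i ≠ 0 then pvLoopA this_offset type_size rest
      else i

def get_from_position_and_type_size (this_offset : Int) (type_size : Int) : Int :=
  pvLoopA this_offset type_size [8, 4, 2, 1]

-- ===== PORT B =====
-- math.gcd(a, b, 8) = gcd(gcd(a, b), 8); math.gcd is nonnegative, as is Int.gcd
def get_from_position_and_type_size_alt (this_offset : Int) (type_size : Int) : Int :=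
  ((Nat.gcd (Int.gcd this_offset type_size) 8 : Nat) : Int)

-- ===== PRECONDITION & SPEC =====
-- A's two assertions: offset nonnegative, size positive; outside this A raises AssertionError.
def Pre_get_from_position_and_type_size (this_offset : Int) (type_size : Int) : Prop :=
  0 ≤ this_offset ∧ 0 < type_size
instance (this_offset : Int) (type_size : Int) : Decidable (Pre_get_from_position_and_type_size this_offset type_size) := by unfold Pre_get_from_position_and_type_size; infer_instance

def pvWitness_get_from_position_and_type_size : Int × Int := (12, 4)

def Spec_get_from_position_and_type_size (this_offset : Int) (type_size : Int) (out : Int) : Prop := out = get_from_position_and_type_size_alt this_offset type_size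
instance (this_offset : Int) (type_size : Int) (out : Int) : Decidable (Spec_get_from_position_and_type_size this_offset type_size out) := by unfold Spec_get_from_position_and_type_size; infer_instance

-- ===== CLAIM (what is proved, stated in full; the proofs are below) =====
def Claim_equal_get_from_position_and_type_size : Prop := ∀ (this_offset : Int) (type_size : Int), Dom_get_from_position_and_type_size this_offset type_size → Pre_get_from_position_and_type_size this_offset type_size → Spec_get_from_position_and_type_size this_offset type_size (get_from_position_and_type_size this_offset type_size)

-- ===== LEMMAS AND PROOFS =====

-- gcd with 8 as a chain of divisibility tests
theorem gcd_eight_chain (n : Nat) :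
    Nat.gcd n 8 = if 8 ∣ n then 8 else if 4 ∣ n then 4 else if 2 ∣ n then 2 else 1 := by
  have h1 : Nat.gcd n 8 = Nat.gcd (n % 8) 8 := by
    rw [Nat.gcd_comm n 8, Nat.gcd_rec 8 n, Nat.gcd_comm]
  have h2 : n % 8 < 8 := Nat.mod_lt _ (by norm_num)
  have d8 : (8 ∣ n) = (n % 8 = 0) := by rw [Nat.dvd_iff_mod_eq_zero]
  have d4 : (4 ∣ n) = (n % 8 % 4 = 0) := by
    rw [Nat.dvd_iff_mod_eq_zero, Nat.mod_mod_of_dvd n (by norm_num : (4:ℕ) ∣ 8)]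
  have d2 : (2 ∣ n) = (n % 8 % 2 = 0) := by
    rw [Nat.dvd_iff_mod_eq_zero, Nat.mod_mod_of_dvd n (by norm_num : (2:ℕ) ∣ 8)]
  rw [h1]
  simp only [d8, d4, d2]
  interval_cases h : n % 8 <;> simp

-- one loop step: the i > ts guard is redundant when i divides ts > 0
theorem pvLoopA_step (o ts i : Int) (hts : 0 < ts) (hi : 0 < i) (rest : List Int) :
    pvLoopA o ts (i :: rest) =
      if o % i = 0 ∧ ts % i = 0 then i else pvLoopA o ts rest := by
  simp only [pvLoopA, PySem.Int.mod_eq_emod_of_pos hi]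
  by_cases h1 : o % i = 0 <;> by_cases h2 : ts % i = 0 <;>
    simp [h1, h2]
  intro hgt
  exact absurd (Int.le_of_dvd hts (Int.dvd_of_emod_eq_zero h2)) (by omega)

theorem gfpts_main (o ts : Int) (_ho : 0 ≤ o) (hts : 0 < ts) :
    get_from_position_and_type_size o ts = get_from_position_and_type_size_alt o ts := by
  have hdvd : ∀ a k : Int, (k ∣ a) ↔ a % k = 0 := by
    intro a k; exact ⟨Int.emod_eq_zero_of_dvd, Int.dvd_of_emod_eq_zero⟩
  have hiff : ∀ k : Nat, k ∣ Int.gcd o ts ↔ ((k : Int) ∣ o ∧ (k : Int) ∣ ts) := by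
    intro k
    constructor
    · intro h
      exact ⟨dvd_trans (Int.natCast_dvd_natCast.mpr h) (Int.gcd_dvd_left o ts),
             dvd_trans (Int.natCast_dvd_natCast.mpr h) (Int.gcd_dvd_right o ts)⟩
    · intro ⟨h1, h2⟩
      exact_mod_cast Int.dvd_gcd h1 h2
  unfold get_from_position_and_type_size get_from_position_and_type_size_alt
  rw [pvLoopA_step o ts 8 hts (by norm_num), pvLoopA_step o ts 4 hts (by norm_num),
      pvLoopA_step o ts 2 hts (by norm_num), pvLoopA_step o ts 1 hts (by norm_num),
      gcd_eight_chain]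
  simp only [hiff, hdvd, apply_ite (fun n : Nat => (n : Int))]
  push_cast
  split_ifs <;> omega

-- ===== VERDICT (by name: the statement is the Claim_ definition above) =====
theorem get_from_position_and_type_size_spec : Claim_equal_get_from_position_and_type_size := by
  intro o ts _ ⟨ho, hts⟩
  exact gfpts_main o ts ho hts
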